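-- pv_equiv track=rewrite | github.com/sakethkatta/AOC-2025 | day10.py | part1
-- ===== SOURCE A (Python) =====
-- from itertools import combinations
--
-- def part1(indicator, buttons):
--     for presses in range(len(buttons) + 1):
--         for combination in combinations(buttons, presses):
--             result = [0] * len(indicator)
--             for button in combination:
--                 for toggle in button:
--                     result[toggle] ^= 1
--             if result == indicator:
--                 return presses
-- ===== SOURCE B (Python) =====
-- def part1(indicator, buttons):
--     def press(state, button):
--         s = list(state)
--         for toggle in button:
--             s[toggle] ^= 1
--         return s
--
--     def best(state, i):
--         if state == indicator:
--             return 0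
--         if i == len(buttons):
--             return None
--         skip = best(state, i + 1)
--         take = best(press(state, buttons[i]), i + 1)
--         if take is not None:
--             take += 1
--         if skip is None:
--             return take
--         if take is None:
--             return skip
--         return min(skip, take)
--
--     return best([0] * len(indicator), 0)
-- ===== Notes on version B (the rewrite author's own statement) =====
-- stated objective: alternative
-- what changed: size-ascending enumeration of itertools.combinations with early return is replaced by a recursive take/skip search over the button list that computes the minimum matching subset size, with an equal-state early exit
-- outside the precondition, e.g. on part1([1], [[0], [5]]): A returns 1, B raises IndexError
import Mathlib
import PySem

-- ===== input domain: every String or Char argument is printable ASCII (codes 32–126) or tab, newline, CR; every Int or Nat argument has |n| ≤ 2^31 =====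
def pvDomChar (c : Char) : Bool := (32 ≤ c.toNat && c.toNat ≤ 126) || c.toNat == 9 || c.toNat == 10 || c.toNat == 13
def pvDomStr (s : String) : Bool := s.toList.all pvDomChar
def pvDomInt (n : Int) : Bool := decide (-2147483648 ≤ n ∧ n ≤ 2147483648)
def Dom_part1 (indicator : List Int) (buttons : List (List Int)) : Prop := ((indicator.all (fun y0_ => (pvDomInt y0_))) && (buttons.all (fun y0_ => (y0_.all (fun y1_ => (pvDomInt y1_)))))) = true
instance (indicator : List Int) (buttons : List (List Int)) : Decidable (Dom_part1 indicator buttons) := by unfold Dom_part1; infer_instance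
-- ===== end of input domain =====

-- One honest line: B replaces A's size-ascending combinations enumeration by a recursive
-- take/skip search over the button list computing the minimum matching subset size (alternative
-- decomposition, similar exponential cost); equivalence is about the return value.

-- ===== PORT A =====
-- 'result[toggle] ^= 1' for one button: read-xor-write fold; none = IndexError.
def pvFlip? (res : List Int) (button : List Int) : Option (List Int) :=
  button.foldl
    (fun acc t => acc.bind (fun r =>
      (PySem.List.pyGet? r t).bind (fun v => PySem.List.pySet? r t (PySem.Int.bxor v 1))))
    (some res)

-- 'result = [0]*len(indicator)' then the inner double loop over the combination.
def pvRunCombo? (n : Nat) (combo : List (List Int)) : Option (List Int) :=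
  combo.foldl (fun acc b => acc.bind (fun r => pvFlip? r b)) (some (List.replicate n 0))

-- the 'for combination in combinations(buttons, presses)' loop: some true = matched (return),
-- some false = exhausted, none = IndexError propagated.
def pvScan (indicator : List Int) : List (List (List Int)) → Option Bool
  | [] => some false
  | c :: rest =>
    match pvRunCombo? indicator.length c with
    | none => none
    | some r => if r = indicator then some true else pvScan indicator rest

-- the outer 'for presses in range(len(buttons) + 1)' loop.
def pvLoopA (indicator : List Int) (buttons : List (List Int)) : List Int → Option Int
  | [] => none
  | k :: ks =>
    match pvScan indicator (PySem.List.combinations buttons k.toNat) with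
    | none => none        -- IndexError: value is unconstrained (outside Pre_part1)
    | some true => some k
    | some false => pvLoopA indicator buttons ks

def part1 (indicator : List Int) (buttons : List (List Int)) : Option Int :=
  pvLoopA indicator buttons (PySem.List.pyRange 0 (PySem.List.len buttons + 1) 1)

-- ===== PORT B =====
-- B's helper 'press(state, button)': same flips, exception threaded as none.
def pvPress? (state : List Int) (button : List Int) : Option (List Int) :=
  button.foldl
    (fun acc t => acc.bind (fun s =>
      (PySem.List.pyGet? s t).bind (fun v => PySem.List.pySet? s t (PySem.Int.bxor v 1))))
    (some state)

-- B's 'best(state, i)' recursing over the remaining suffix of buttons;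
-- outer none = IndexError, inner Option Int = Python's return value (None or int).
def pvBest (indicator : List Int) : List (List Int) → List Int → Option (Option Int)
  | bs, state =>
    if state = indicator then some (some 0)
    else
      match bs with
      | [] => some none
      | b :: rest =>
        match pvBest indicator rest state with
        | none => none
        | some skip =>
          match pvPress? state b with
          | none => none
          | some s =>
            match pvBest indicator rest s with
            | none => none
            | some take0 =>
              some (match skip, take0.map (· + 1) with
                    | none, t => t
                    | some a, none => some a
                    | some a, some b => some (min a b))

def part1_alt (indicator : List Int) (buttons : List (List Int)) : Option Int :=
  match pvBest indicator buttons (List.replicate indicator.length 0) with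
  | none => none          -- IndexError: value is unconstrained (outside Pre_part1)
  | some r => r

-- ===== PRECONDITION & SPEC =====
-- Pre_ excludes inputs whose buttons contain a toggle index out of range for the indicator
-- (unless the indicator is all zeros, where both programs return 0 before touching any button):
-- on the excluded inputs the two programs raise IndexError at different points of their
-- different search orders, and A may return before its raise where B raises first.
def Pre_part1 (indicator : List Int) (buttons : List (List Int)) : Prop :=
  (∀ x ∈ indicator, x = 0) ∨
  (∀ b ∈ buttons, ∀ t ∈ b, PySem.Raise.InRange indicator.length t)
instance (indicator : List Int) (buttons : List (List Int)) : Decidable (Pre_part1 indicator buttons) := by unfold Pre_part1; infer_instance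

def pvWitness_part1 : List Int × List (List Int) := ([1, 0], [[0], [1]])

def Spec_part1 (indicator : List Int) (buttons : List (List Int)) (out : Option Int) : Prop := out = part1_alt indicator buttons
instance (indicator : List Int) (buttons : List (List Int)) (out : Option Int) : Decidable (Spec_part1 indicator buttons out) := by unfold Spec_part1; infer_instance

-- ===== CLAIM (what is proved, stated in full; the proofs are below) =====
def Claim_equal_part1 : Prop := ∀ (indicator : List Int) (buttons : List (List Int)), Dom_part1 indicator buttons → Pre_part1 indicator buttons → Spec_part1 indicator buttons (part1 indicator buttons)

-- ===== LEMMAS AND PROOFS =====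

-- Pure (exception-free) versions of the flip loop, used only in proofs.
def pvPressP (r : List Int) (b : List Int) : List Int :=
  b.foldl (fun s t => PySem.List.pySetD s t (PySem.Int.bxor (PySem.List.pyGetD s t 0) 1)) r

def pvApp (s : List Int) (cs : List (List Int)) : List Int := cs.foldl pvPressP s

-- 'there is a matching subset of size k'
def pvP (indicator : List Int) (buttons : List (List Int)) (k : Nat) : Prop :=
  ∃ c, c.Sublist buttons ∧ c.length = k ∧ pvApp (List.replicate indicator.length 0) c = indicator

lemma pvIdx_some (n : Nat) (i : Int) (h : PySem.Raise.InRange n i) :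
    ∃ k, PySem.List.pyIdx? n i = some k ∧ k < n := by
  obtain ⟨h1, h2⟩ := h
  unfold PySem.List.pyIdx?
  by_cases h0 : 0 ≤ i
  · exact ⟨i.toNat, by simp [h0, h2], by omega⟩
  · refine ⟨n - (-i).toNat, by simp [h0, h1], by omega⟩

lemma pvGet_eq (xs : List Int) (i : Int) (h : PySem.Raise.InRange xs.length i) :
    PySem.List.pyGet? xs i = some (PySem.List.pyGetD xs i 0) := by
  obtain ⟨k, hk, hlt⟩ := pvIdx_some xs.length i h
  simp [PySem.List.pyGet?, PySem.List.pyGetD, hk, List.getElem?_eq_getElem hlt]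

lemma pvSet_eq (xs : List Int) (i v : Int) (h : PySem.Raise.InRange xs.length i) :
    PySem.List.pySet? xs i v = some (PySem.List.pySetD xs i v) := by
  obtain ⟨k, hk, _⟩ := pvIdx_some xs.length i h
  simp [PySem.List.pySet?, PySem.List.pySetD, hk]

lemma pvPressP_length : ∀ (b : List Int) (r : List Int), (pvPressP r b).length = r.length := by
  intro b
  induction b with
  | nil => intro r; rfl
  | cons t ts ih =>
    intro r
    show (pvPressP (PySem.List.pySetD r t _) ts).length = r.length
    rw [ih, PySem.List.length_pySetD]

lemma pvFlip_eq : ∀ (b : List Int) (r : List Int),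
    (∀ t ∈ b, PySem.Raise.InRange r.length t) → pvFlip? r b = some (pvPressP r b) := by
  intro b
  induction b with
  | nil => intro r _; rfl
  | cons t ts ih =>
    intro r h
    have ht := h t (by simp)
    show (ts.foldl _ ((some r).bind _)) = _
    rw [show ((some r).bind (fun r =>
        (PySem.List.pyGet? r t).bind (fun v => PySem.List.pySet? r t (PySem.Int.bxor v 1)))) =
        some (PySem.List.pySetD r t (PySem.Int.bxor (PySem.List.pyGetD r t 0) 1)) by
      simp [pvGet_eq r t ht, pvSet_eq r t _ ht]]
    have := ih (PySem.List.pySetD r t (PySem.Int.bxor (PySem.List.pyGetD r t 0) 1))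
      (by rw [PySem.List.length_pySetD]; exact fun u hu => h u (by simp [hu]))
    exact this

lemma pvRun_eq : ∀ (cs : List (List Int)) (s : List Int),
    (∀ b ∈ cs, ∀ t ∈ b, PySem.Raise.InRange s.length t) →
    cs.foldl (fun acc b => acc.bind (fun r => pvFlip? r b)) (some s) = some (pvApp s cs) := by
  intro cs
  induction cs with
  | nil => intro s _; rfl
  | cons b rest ih =>
    intro s h
    show rest.foldl _ ((some s).bind (fun r => pvFlip? r b)) = _
    rw [show (some s).bind (fun r => pvFlip? r b) = some (pvPressP s b) by
      simp [pvFlip_eq b s (h b (by simp))]]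
    exact ih (pvPressP s b) (by
      rw [pvPressP_length]
      exact fun b' hb' => h b' (by simp [hb']))

lemma pvRunCombo_eq (indicator : List Int) (c : List (List Int))
    (h : ∀ b ∈ c, ∀ t ∈ b, PySem.Raise.InRange indicator.length t) :
    pvRunCombo? indicator.length c = some (pvApp (List.replicate indicator.length 0) c) := by
  unfold pvRunCombo?
  exact pvRun_eq c _ (by simpa using h)

lemma pvScan_eq (indicator : List Int) : ∀ (L : List (List (List Int))),
    (∀ c ∈ L, ∀ b ∈ c, ∀ t ∈ b, PySem.Raise.InRange indicator.length t) →
    pvScan indicator L =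
      some (decide (∃ c ∈ L, pvApp (List.replicate indicator.length 0) c = indicator)) := by
  intro L
  induction L with
  | nil => intro _; simp [pvScan]
  | cons c rest ih =>
    intro h
    rw [pvScan, pvRunCombo_eq indicator c (h c (by simp))]
    show (if pvApp (List.replicate indicator.length 0) c = indicator then some true
          else pvScan indicator rest) = _
    by_cases hc : pvApp (List.replicate indicator.length 0) c = indicator
    · rw [if_pos hc]; simp [hc]
    · rw [if_neg hc, ih (fun c' hc' => h c' (by simp [hc']))]
      simp [hc]

lemma pvPress_eq (b : List Int) (r : List Int)
    (h : ∀ t ∈ b, PySem.Raise.InRange r.length t) : pvPress? r b = some (pvPressP r b) :=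
  pvFlip_eq b r h

-- proof-side name for the skip/take combination at the end of B's 'best'
def pvComb (skip take0 : Option Int) : Option Int :=
  match skip, take0.map (· + 1) with
  | none, t => t
  | some a, none => some a
  | some a, some b => some (min a b)

lemma pvBest_spec (indicator : List Int) : ∀ (bs : List (List Int)) (state : List Int),
    state.length = indicator.length →
    (∀ b ∈ bs, ∀ t ∈ b, PySem.Raise.InRange indicator.length t) →
    ∃ o, pvBest indicator bs state = some o ∧
      (∀ c, c.Sublist bs → pvApp state c = indicator →
        ∃ m, o = some m ∧ 0 ≤ m ∧ m ≤ (c.length : Int)) ∧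
      (∀ m, o = some m →
        ∃ c, c.Sublist bs ∧ (c.length : Int) = m ∧ pvApp state c = indicator) := by
  intro bs
  induction bs with
  | nil =>
    intro state _ _
    by_cases hs : state = indicator
    · refine ⟨some 0, by rw [pvBest, if_pos hs], ?_, ?_⟩
      · intro c _ _; exact ⟨0, rfl, le_refl 0, by positivity⟩
      · intro m hm
        exact ⟨[], List.nil_sublist _, by simpa using Option.some.inj hm, hs⟩
    · refine ⟨none, by rw [pvBest, if_neg hs], ?_, ?_⟩
      · intro c hc happ
        rw [List.sublist_nil.mp hc] at happ
        exact absurd happ hs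
      · intro m hm; simp at hm
  | cons b rest ih =>
    intro state hlen hR
    by_cases hs : state = indicator
    · refine ⟨some 0, by rw [pvBest, if_pos hs], ?_, ?_⟩
      · intro c _ _; exact ⟨0, rfl, le_refl 0, by positivity⟩
      · intro m hm
        exact ⟨[], List.nil_sublist _, by simpa using Option.some.inj hm, hs⟩
    · have hRrest : ∀ b' ∈ rest, ∀ t ∈ b', PySem.Raise.InRange indicator.length t :=
        fun b' hb' => hR b' (by simp [hb'])
      obtain ⟨oskip, hm1, hA1, hE1⟩ := ih state hlen hRrest
      have hpress : pvPress? state b = some (pvPressP state b) :=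
        pvPress_eq b state (by rw [hlen]; exact hR b (by simp))
      have hplen : (pvPressP state b).length = indicator.length := by
        rw [pvPressP_length, hlen]
      obtain ⟨otake, hm2, hA2, hE2⟩ := ih (pvPressP state b) hplen hRrest
      refine ⟨pvComb oskip otake, ?_, ?_, ?_⟩
      · rw [pvBest, if_neg hs]
        simp only [hm1, hpress, hm2]
        rfl
      · -- every matching subset bounds the result from above
        intro c hc happ
        rcases List.sublist_cons_iff.mp hc with hcr | ⟨c', rfl, hc'⟩
        · obtain ⟨m, hm, hm0, hmle⟩ := hA1 c hcr happ
          subst hm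
          rcases otake with _ | mt
          · exact ⟨m, by simp [pvComb], hm0, hmle⟩
          · obtain ⟨c2, _, hl2, _⟩ := hE2 mt rfl
            have hmt0 : (0:Int) ≤ mt := hl2 ▸ Int.natCast_nonneg _
            exact ⟨min m (mt + 1), by simp [pvComb], le_min hm0 (by omega),
              le_trans (min_le_left _ _) hmle⟩
        · have happ' : pvApp (pvPressP state b) c' = indicator := happ
          obtain ⟨m, hm, hm0, hmle⟩ := hA2 c' hc' happ'
          subst hm
          have hlen' : ((b :: c').length : Int) = (c'.length : Int) + 1 := by
            simp [List.length_cons]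
          rcases oskip with _ | ms
          · exact ⟨m + 1, by simp [pvComb], by omega, by omega⟩
          · obtain ⟨c2, _, hl2, _⟩ := hE1 ms rfl
            have hms0 : (0:Int) ≤ ms := hl2 ▸ Int.natCast_nonneg _
            exact ⟨min ms (m + 1), by simp [pvComb], le_min hms0 (by omega),
              le_trans (min_le_right _ _) (by omega)⟩
      · -- every returned value is attained by some subset
        intro m hm
        rcases oskip with _ | ms <;> rcases otake with _ | mt <;> simp [pvComb] at hm
        · obtain ⟨c, hc, hl, happ⟩ := hE2 mt rfl
          refine ⟨b :: c, List.cons_sublist_cons.mpr hc, ?_, happ⟩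
          simp only [List.length_cons]; push_cast; omega
        · obtain ⟨c, hc, hl, happ⟩ := hE1 ms rfl
          exact ⟨c, hc.trans (List.sublist_cons_self b rest), by omega, happ⟩
        · rcases le_total ms (mt + 1) with hle | hle
          · obtain ⟨c, hc, hl, happ⟩ := hE1 ms rfl
            refine ⟨c, hc.trans (List.sublist_cons_self b rest), ?_, happ⟩
            rw [min_eq_left hle] at hm; omega
          · obtain ⟨c, hc, hl, happ⟩ := hE2 mt rfl
            refine ⟨b :: c, List.cons_sublist_cons.mpr hc, ?_, happ⟩
            rw [min_eq_right hle] at hm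
            simp only [List.length_cons]; push_cast; omega

lemma pvLoopA_eq (indicator : List Int) (buttons : List (List Int))
    (hR : ∀ b ∈ buttons, ∀ t ∈ b, PySem.Raise.InRange indicator.length t)
    (o : Option Int)
    (H1 : ∀ c, c.Sublist buttons → pvApp (List.replicate indicator.length 0) c = indicator →
      ∃ m, o = some m ∧ 0 ≤ m ∧ m ≤ (c.length : Int))
    (H2 : ∀ m, o = some m →
      ∃ c, c.Sublist buttons ∧ (c.length : Int) = m ∧
        pvApp (List.replicate indicator.length 0) c = indicator) :
    ∀ (d : Nat) (k : Nat), k + d = buttons.length + 1 →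
      (∀ j : Nat, j < k → ¬ pvP indicator buttons j) →
      pvLoopA indicator buttons
        (PySem.List.pyRange (k : Int) ((buttons.length : Int) + 1) 1) = o := by
  intro d
  induction d with
  | zero =>
    intro k hk hinv
    rw [PySem.List.pyRange_one_eq_nil (by omega)]
    show none = o
    rcases o with _ | m
    · rfl
    · obtain ⟨c, hc, hl, happ⟩ := H2 m rfl
      have hle := hc.length_le
      exact absurd ⟨c, hc, rfl, happ⟩ (hinv c.length (by omega))
  | succ d ihd =>
    intro k hk hinv
    rw [PySem.List.pyRange_one_cons (by omega)]
    rw [pvLoopA]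
    have hcond : ∀ c ∈ PySem.List.combinations buttons ((k : Int)).toNat, ∀ b ∈ c, ∀ t ∈ b,
        PySem.Raise.InRange indicator.length t := by
      intro c hcmem b hb t ht
      exact hR b ((PySem.List.sublist_of_mem_combinations hcmem).subset hb) t ht
    rw [pvScan_eq indicator _ hcond]
    by_cases hP : ∃ c ∈ PySem.List.combinations buttons ((k : Int)).toNat,
        pvApp (List.replicate indicator.length 0) c = indicator
    · rw [decide_eq_true hP]
      obtain ⟨c, hcmem, happ⟩ := hP
      obtain ⟨hsub, hclen⟩ := (PySem.List.mem_combinations_iff _ _ _).mp hcmem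
      obtain ⟨m, rfl, hm0, hmle⟩ := H1 c hsub happ
      obtain ⟨c', hc', hl', happ'⟩ := H2 m rfl
      have hnot : ¬ (c'.length < k) := fun hlt => hinv c'.length hlt ⟨c', hc', rfl, happ'⟩
      have hk' : (k : Int).toNat = k := by omega
      show some (k : Int) = some m
      have hmk : m = (k : Int) := by omega
      rw [hmk]
    · rw [decide_eq_false hP]
      show pvLoopA indicator buttons (PySem.List.pyRange ((k : Int) + 1) _ 1) = o
      have hcast : ((k : Int) + 1) = ((k + 1 : Nat) : Int) := by push_cast; ring
      rw [hcast]
      apply ihd (k + 1) (by omega)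
      intro j hj
      by_cases hjk : j < k
      · exact hinv j hjk
      · have hjeq : j = k := by omega
        subst hjeq
        rintro ⟨c, hc, hclen, happ⟩
        exact hP ⟨c, (PySem.List.mem_combinations_iff _ _ _).mpr ⟨hc, by omega⟩, happ⟩

lemma pvZeroCase (indicator : List Int) (buttons : List (List Int))
    (h : indicator = List.replicate indicator.length 0) :
    part1 indicator buttons = some 0 ∧ part1_alt indicator buttons = some 0 := by
  have hscan : pvScan indicator [[]] = some true := by
    rw [pvScan]
    show (if List.replicate indicator.length 0 = indicator then some true
          else pvScan indicator []) = some true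
    rw [if_pos h.symm]
  constructor
  · unfold part1
    rw [PySem.List.len_eq, PySem.List.pyRange_one_cons (by positivity)]
    rw [pvLoopA]
    rw [show ((0 : Int)).toNat = 0 from rfl, PySem.List.combinations_zero, hscan]
  · unfold part1_alt
    rcases buttons with _ | ⟨b, bs⟩ <;> rw [pvBest, if_pos h.symm]

-- ===== VERDICT (by name: the statement is the Claim_ definition above) =====
theorem part1_spec : Claim_equal_part1 := by
  intro indicator buttons _ hpre
  unfold Spec_part1
  rcases hpre with hz | hR
  · obtain ⟨h1, h2⟩ := pvZeroCase indicator buttons (List.eq_replicate_of_mem hz)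
    rw [h1, h2]
  · obtain ⟨o, hbest, H1, H2⟩ :=
      pvBest_spec indicator buttons (List.replicate indicator.length 0) (by simp) hR
    have hb : part1_alt indicator buttons = o := by
      unfold part1_alt; rw [hbest]
    have ha : part1 indicator buttons = o := by
      unfold part1
      rw [PySem.List.len_eq]
      have := pvLoopA_eq indicator buttons hR o H1 H2 (buttons.length + 1) 0 (by omega)
        (by intro j hj; omega)
      simpa using this
    rw [ha, hb]
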